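-- pv_equiv track=rewrite | github.com/x1Dman/course | main.py | is_simplify
-- ===== SOURCE A (Python) =====
-- CONSTANTS = ["A", "B", "C"]
--
-- VARS = ["x", "y", "z"]
--
-- def is_simplify(left, right, constants=CONSTANTS, vars=VARS):
--     simplify_dictionary_first = {}
--     constants_counter_first = 0
--
--     simplify_dictionary_second = {}
--     constants_counter_second = 0
--
--     min_len = len(right) if len(left) > len(right) else len(left)
--     for i in range(min_len):
--         left_elem = left[i]
--         right_elem = right[i]
--         if left_elem in constants:
--             constants_counter_first += 1
--         else:
--             if left_elem in simplify_dictionary_first: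
--                 simplify_dictionary_first[left[i]] += 1
--             else:
--                 simplify_dictionary_first[left[i]] = 1
--         if right_elem in constants:
--             constants_counter_second += 1
--         else:
--             if right_elem in simplify_dictionary_second:
--                 simplify_dictionary_second[right[i]] += 1
--             else:
--                 simplify_dictionary_second[right[i]] = 1
--     # Проверка, что мультимножество переменных и количество элементов из констант равны.
--     if simplify_dictionary_first and simplify_dictionary_second and simplify_dictionary_first == simplify_dictionary_second and constants_counter_first == constants_counter_second:
--         return True
--     return False
-- ===== SOURCE B (Python) =====
-- CONSTANTS = ["A", "B", "C"]
--
-- VARS = ["x", "y", "z"]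
--
-- def is_simplify(left, right, constants=CONSTANTS, vars=VARS):
--     # Compare the two prefixes of common length n. The non-constant (variable)
--     # multisets are compared by sorting; the constant counters of A are implied:
--     # both prefixes have length n, so equal variable lists force equal constant counts.
--     n = min(len(left), len(right))
--     left_vars = sorted(x for x in left[:n] if x not in constants)
--     right_vars = sorted(x for x in right[:n] if x not in constants)
--     return bool(left_vars) and left_vars == right_vars
-- ===== Notes on version B (the rewrite author's own statement) =====
-- stated objective: simpler
-- what changed: Replaces the indexed loop building two frequency dicts and two constant counters with slice/filter/sort: the variable multisets are compared as sorted lists, and the constant-count test disappears because equal-length prefixes with equal variable lists force equal constant counts.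
import Mathlib
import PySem

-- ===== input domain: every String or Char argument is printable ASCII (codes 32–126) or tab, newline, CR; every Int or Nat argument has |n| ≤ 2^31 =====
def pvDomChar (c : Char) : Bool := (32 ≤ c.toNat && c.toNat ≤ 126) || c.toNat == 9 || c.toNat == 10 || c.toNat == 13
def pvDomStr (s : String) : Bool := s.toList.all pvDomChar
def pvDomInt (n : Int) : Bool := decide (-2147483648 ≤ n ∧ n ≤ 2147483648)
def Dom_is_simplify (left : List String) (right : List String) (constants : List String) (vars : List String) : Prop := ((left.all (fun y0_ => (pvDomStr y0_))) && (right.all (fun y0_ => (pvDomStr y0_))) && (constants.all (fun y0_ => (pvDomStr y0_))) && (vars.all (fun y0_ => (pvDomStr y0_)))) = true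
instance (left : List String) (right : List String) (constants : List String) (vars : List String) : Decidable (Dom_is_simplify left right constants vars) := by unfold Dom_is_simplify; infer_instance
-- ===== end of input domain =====

-- B replaces A's indexed loop over two frequency dicts with slice/filter/sort-and-compare (objective: simpler).

-- ===== PORT A =====
-- Python dict '==' compares the key-value mapping ignoring insertion order; exact for that.
def pyDictEq (d1 d2 : PySem.Dict String Int) : Bool :=
  d1.keys.all (fun k => d1.get? k == d2.get? k) && d2.keys.all (fun k => d2.get? k == d1.get? k)

def is_simplify (left : List String) (right : List String) (constants : List String) (vars : List String) : Bool :=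
  let min_len : Int := if (left.length : Int) > (right.length : Int) then (right.length : Int) else (left.length : Int)
  let st := (PySem.List.pyRange 0 min_len 1).foldl
    (fun (st : PySem.Dict String Int × Int × PySem.Dict String Int × Int) i =>
      let (d1, c1, d2, c2) := st
      let left_elem := PySem.List.pyGetD left i ""
      let right_elem := PySem.List.pyGetD right i ""
      let (d1', c1') :=
        if constants.contains left_elem then (d1, c1 + 1)
        else (if d1.contains left_elem then d1.insert left_elem (d1.getD left_elem 0 + 1)
              else d1.insert left_elem 1, c1)
      let (d2', c2') :=
        if constants.contains right_elem then (d2, c2 + 1)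
        else (if d2.contains right_elem then d2.insert right_elem (d2.getD right_elem 0 + 1)
              else d2.insert right_elem 1, c2)
      (d1', c1', d2', c2'))
    (PySem.Dict.empty, 0, PySem.Dict.empty, 0)
  let (d1, c1, d2, c2) := st
  if d1.size != 0 && d2.size != 0 && pyDictEq d1 d2 && c1 == c2 then true else false

-- ===== PORT B =====
def is_simplify_alt (left : List String) (right : List String) (constants : List String) (vars : List String) : Bool :=
  let n : Int := min (left.length : Int) (right.length : Int)
  let left_vars := PySem.List.sorted ((PySem.List.slice left none (some n)).filter (fun x => !constants.contains x)) (fun x => x) false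
  let right_vars := PySem.List.sorted ((PySem.List.slice right none (some n)).filter (fun x => !constants.contains x)) (fun x => x) false
  !left_vars.isEmpty && left_vars == right_vars

-- ===== PRECONDITION & SPEC =====
def Spec_is_simplify (left : List String) (right : List String) (constants : List String) (vars : List String) (out : Bool) : Prop := out = is_simplify_alt left right constants vars
instance (left : List String) (right : List String) (constants : List String) (vars : List String) (out : Bool) : Decidable (Spec_is_simplify left right constants vars out) := by unfold Spec_is_simplify; infer_instance

-- ===== CLAIM (what is proved, stated in full; the proofs are below) =====
def Claim_equal_is_simplify : Prop := ∀ (left : List String) (right : List String) (constants : List String) (vars : List String), Dom_is_simplify left right constants vars → Spec_is_simplify left right constants vars (is_simplify left right constants vars)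

-- ===== LEMMAS AND PROOFS =====

-- pvCntI: the insert-pattern counting fold of port A, as a standalone function of the list.
def pvCntI (l : List String) : PySem.Dict String Int :=
  l.foldl (fun d x => d.insert x (d.getD x 0 + 1)) PySem.Dict.empty

lemma pvCntI_append (l : List String) (a : String) :
    pvCntI (l ++ [a]) = (pvCntI l).insert a ((pvCntI l).getD a 0 + 1) := by
  simp [pvCntI, List.foldl_append]

-- A's two insert branches collapse: the absent-key branch inserts 1 = getD + 1.
lemma pv_step_collapse (d : PySem.Dict String Int) (a : String) :
    (if d.contains a then d.insert a (d.getD a 0 + 1) else d.insert a 1)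
      = d.insert a (d.getD a 0 + 1) := by
  by_cases h : d.contains a = true
  · simp [h]
  · rw [if_neg (by simpa using h), PySem.Dict.getD_of_not_contains d 0 (by simpa using h)]
    norm_num

-- The indexed loop of port A, characterised: counting dict = pvCntI of the filtered prefix,
-- constant counter = number of constants in the prefix, independently on each side.
lemma pv_fold (constants left right : List String) (n : Nat)
    (hl : n ≤ left.length) (hr : n ≤ right.length) :
    (PySem.List.pyRange 0 (n : Int) 1).foldl
      (fun (st : PySem.Dict String Int × Int × PySem.Dict String Int × Int) i =>
        let (d1, c1, d2, c2) := st
        let left_elem := PySem.List.pyGetD left i ""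
        let right_elem := PySem.List.pyGetD right i ""
        let (d1', c1') :=
          if constants.contains left_elem then (d1, c1 + 1)
          else (if d1.contains left_elem then d1.insert left_elem (d1.getD left_elem 0 + 1)
                else d1.insert left_elem 1, c1)
        let (d2', c2') :=
          if constants.contains right_elem then (d2, c2 + 1)
          else (if d2.contains right_elem then d2.insert right_elem (d2.getD right_elem 0 + 1)
                else d2.insert right_elem 1, c2)
        (d1', c1', d2', c2'))
      (PySem.Dict.empty, 0, PySem.Dict.empty, 0)
    = (pvCntI ((left.take n).filter (fun x => !constants.contains x)),
       (((left.take n).filter (fun x => constants.contains x)).length : Int),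
       pvCntI ((right.take n).filter (fun x => !constants.contains x)),
       (((right.take n).filter (fun x => constants.contains x)).length : Int)) := by
  induction n with
  | zero => simp [pvCntI]
  | succ n ih =>
    have hl' : n < left.length := by omega
    have hr' : n < right.length := by omega
    have hLt : left.take (n + 1) = left.take n ++ [left[n]] := by
      rw [List.take_add_one, List.getElem?_eq_getElem hl']; rfl
    have hRt : right.take (n + 1) = right.take n ++ [right[n]] := by
      rw [List.take_add_one, List.getElem?_eq_getElem hr']; rfl
    rw [PySem.List.pyRange_zero_natCast] at ih ⊢
    rw [List.range_succ, List.map_append, List.foldl_append, ih (by omega) (by omega)]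
    have hgl : PySem.List.pyGetD left ((n : Nat) : Int) "" = left[n] := by
      rw [PySem.List.pyGetD_natCast, List.getD_eq_getElem _ _ hl']
    have hgr : PySem.List.pyGetD right ((n : Nat) : Int) "" = right[n] := by
      rw [PySem.List.pyGetD_natCast, List.getD_eq_getElem _ _ hr']
    simp only [List.map_cons, List.map_nil, List.foldl_cons, List.foldl_nil, hgl, hgr,
      hLt, hRt, List.filter_append, List.length_append]
    by_cases hc1 : constants.contains left[n] <;> by_cases hc2 : constants.contains right[n] <;>
      simp only [hc1, hc2, if_true, List.filter_cons, List.filter_nil,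
        Bool.not_true, Bool.not_false, pv_step_collapse, pvCntI_append] <;> simp

-- get? on a counter: some count at members, none elsewhere.
lemma pv_get?_counter (xs : List String) (v : String) :
    (PySem.Dict.counter xs).get? v
      = if v ∈ xs then some ((xs.count v : Int)) else none := by
  by_cases h : v ∈ xs
  · have hc : (PySem.Dict.counter xs).contains v = true := by
      rw [PySem.Dict.contains_counter]; simpa using h
    have hne : (PySem.Dict.counter xs).get? v ≠ none := by
      rw [Ne, PySem.Dict.get?_eq_none_iff_contains, hc]; simp
    obtain ⟨w, hw⟩ := Option.ne_none_iff_exists'.mp hne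
    have hD := PySem.Dict.getD_of_get?_eq_some (PySem.Dict.counter xs) 0 hw
    rw [PySem.Dict.getD_counter] at hD
    rw [if_pos h, hw, ← hD]
  · rw [if_neg h, PySem.Dict.get?_eq_none_iff_contains, PySem.Dict.contains_counter]
    simpa using h

-- Python's order-insensitive dict equality on two counters is multiset equality.
lemma pv_dictEq_iff (xs ys : List String) :
    pyDictEq (PySem.Dict.counter xs) (PySem.Dict.counter ys) = true ↔ xs.Perm ys := by
  rw [List.perm_iff_count]
  unfold pyDictEq
  simp only [Bool.and_eq_true, List.all_eq_true, PySem.Dict.keys_counter, beq_iff_eq]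
  constructor
  · rintro ⟨h1, h2⟩ a
    by_cases hx : a ∈ xs
    · have h := h1 a ((PySem.Set.mem_ofList xs a).mpr hx)
      rw [pv_get?_counter, pv_get?_counter, if_pos hx] at h
      by_cases hy : a ∈ ys
      · rw [if_pos hy] at h; exact_mod_cast Option.some.inj h
      · rw [if_neg hy] at h; simp at h
    · by_cases hy : a ∈ ys
      · have h := h2 a ((PySem.Set.mem_ofList ys a).mpr hy)
        rw [pv_get?_counter, pv_get?_counter, if_pos hy, if_neg hx] at h
        simp at h
      · simp [List.count_eq_zero.mpr hx, List.count_eq_zero.mpr hy]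
  · intro h
    have hmem : ∀ a, a ∈ xs ↔ a ∈ ys := fun a => by
      rw [← List.count_pos_iff, ← List.count_pos_iff, h a]
    refine ⟨fun k hk => ?_, fun k hk => ?_⟩
    · have hx := (PySem.Set.mem_ofList xs k).mp hk
      rw [pv_get?_counter, pv_get?_counter, if_pos hx, if_pos ((hmem k).mp hx), h k]
    · have hy := (PySem.Set.mem_ofList ys k).mp hk
      rw [pv_get?_counter, pv_get?_counter, if_pos hy, if_pos ((hmem k).mpr hy), h k]

-- Python dict truthiness of a counter: nonzero size iff the counted list is nonempty.
lemma pv_counter_size_ne (xs : List String) :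
    (PySem.Dict.counter xs).size ≠ 0 ↔ xs ≠ [] := by
  have hk : (PySem.Dict.counter xs).size = (PySem.Set.ofList xs).length := by
    have h := congrArg List.length (PySem.Dict.keys_counter xs)
    simpa [PySem.Dict.keys, PySem.Dict.size] using h
  rw [hk]
  constructor
  · intro h hnil; subst hnil; simp [PySem.Set.ofList] at h
  · intro h hlen
    match xs, h with
    | a :: t, _ =>
      have : a ∈ PySem.Set.ofList (a :: t) := (PySem.Set.mem_ofList _ a).mpr (by simp)
      rw [List.length_eq_zero_iff] at hlen
      simp [hlen] at this

lemma pv_filter_len (q : String → Bool) (l : List String) :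
    (l.filter q).length + (l.filter (fun x => !q x)).length = l.length := by
  induction l with
  | nil => simp
  | cons a t ih => by_cases h : q a <;> simp [h] <;> omega

lemma pv_if_bool (b : Bool) : (if b then true else false) = b := by cases b <;> simp

-- ===== VERDICT (by name: the statement is the Claim_ definition above) =====
theorem is_simplify_spec : Claim_equal_is_simplify := by
  intro left right constants vars _
  unfold Spec_is_simplify is_simplify is_simplify_alt
  dsimp only
  set n : Nat := min left.length right.length with hn
  have hl : n ≤ left.length := Nat.min_le_left _ _
  have hr : n ≤ right.length := Nat.min_le_right _ _
  have hmin : (if (left.length : Int) > (right.length : Int) then (right.length : Int)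
      else (left.length : Int)) = (n : Int) := by
    rw [hn]; split_ifs with h <;> simp [Nat.min_def] <;> omega
  have hminB : min (left.length : Int) (right.length : Int) = (n : Int) := by
    rw [hn]; simp [Nat.min_def]; split_ifs with h <;> omega
  rw [hmin, hminB, pv_fold constants left right n hl hr,
    PySem.List.slice_to left (by positivity), PySem.List.slice_to right (by positivity),
    Int.toNat_natCast]
  dsimp only
  set xs := (left.take n).filter (fun x => !constants.contains x) with hxs
  set ys := (right.take n).filter (fun x => !constants.contains x) with hys
  have hcnt : ∀ l : List String, pvCntI l = PySem.Dict.counter l := fun l =>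
    PySem.Dict.foldl_insert_getD_add_one_eq_counter l
  rw [hcnt, hcnt, pv_if_bool]
  rw [Bool.eq_iff_iff]
  simp only [Bool.and_eq_true, bne_iff_ne, Ne, beq_iff_eq, Bool.not_eq_true',
    List.isEmpty_eq_false_iff, beq_iff_eq]
  constructor
  · rintro ⟨⟨⟨hs1, hs2⟩, heq⟩, _⟩
    have hperm := (pv_dictEq_iff xs ys).mp heq
    refine ⟨?_, (PySem.List.sorted_id_eq_sorted_id_iff_perm xs ys).mpr hperm⟩
    intro h
    exact (pv_counter_size_ne xs).mp hs1
      ((PySem.List.sorted_eq_nil_iff xs (fun x => x) false).mp h)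
  · rintro ⟨hne, hseq⟩
    have hperm := (PySem.List.sorted_id_eq_sorted_id_iff_perm xs ys).mp hseq
    have hxne : xs ≠ [] := fun h =>
      hne ((PySem.List.sorted_eq_nil_iff xs (fun x => x) false).mpr h)
    have hyne : ys ≠ [] := fun h => hxne ((h ▸ hperm).eq_nil)
    refine ⟨⟨⟨(pv_counter_size_ne xs).mpr hxne, (pv_counter_size_ne ys).mpr hyne⟩,
      (pv_dictEq_iff xs ys).mpr hperm⟩, ?_⟩
    have hlenL : (left.take n).length = n := by simp [hl]
    have hlenR : (right.take n).length = n := by simp [hr]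
    have h1 := pv_filter_len (fun x => constants.contains x) (left.take n)
    have h2 := pv_filter_len (fun x => constants.contains x) (right.take n)
    have hfl : xs.length = ys.length := hperm.length_eq
    rw [hxs] at hfl; rw [hys] at hfl
    rw [hlenL] at h1; rw [hlenR] at h2
    have : ((left.take n).filter (fun x => constants.contains x)).length
        = ((right.take n).filter (fun x => constants.contains x)).length := by omega
    exact_mod_cast this
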